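-- pv_equiv track=rewrite | github.com/PhyoZX/Programming-Problems | alphabet_soup.py | alphabetSoup
-- ===== SOURCE A (Python) =====
-- def alphabetSoup(str) :
--     li = sorted(list(str))
--     liLower = sorted(list(str.lower()))
--     caps = []
--     newStr = ""
--
--     for char in li :
--         if char.isupper() :
--             caps.append(char)
--
--     for letter in liLower :
--         if caps.count(letter.upper()) != 0 :
--             newStr += letter.upper()
--             caps.pop(caps.index(letter.upper()))
--         else :
--             newStr += letter
--
--     return newStr
-- ===== SOURCE B (Python) =====
-- def alphabetSoup(str):
--     return "".join(sorted(str, key=lambda c: (c.lower(), c.islower())))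
-- ===== Notes on version B (the rewrite author's own statement) =====
-- stated objective: simpler
-- what changed: Replaces A's two-stage count-and-rewrite (collect uppercase letters from a sorted copy, then walk the sorted lowercased string re-capitalizing while scanning/popping the caps list) with a single stable sort of the original characters under the composite key (c.lower(), c.islower()), a one-liner with no counting, no second pass and no per-letter list scans.
import Mathlib
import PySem

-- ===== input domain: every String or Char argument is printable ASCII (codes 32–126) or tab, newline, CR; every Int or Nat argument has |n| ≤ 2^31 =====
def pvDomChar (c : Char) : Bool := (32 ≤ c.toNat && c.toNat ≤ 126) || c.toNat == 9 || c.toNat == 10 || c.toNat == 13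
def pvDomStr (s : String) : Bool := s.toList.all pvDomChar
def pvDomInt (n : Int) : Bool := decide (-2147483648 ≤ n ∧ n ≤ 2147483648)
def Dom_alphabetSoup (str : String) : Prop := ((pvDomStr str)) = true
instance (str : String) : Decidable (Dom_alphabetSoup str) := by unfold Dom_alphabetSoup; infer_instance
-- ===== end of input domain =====

-- B replaces A's two-stage count-and-rewrite by ONE stable sort of the original characters
-- under the composite key (c.lower(), c.islower()); equality of the return values is proved below.

-- ===== PORT A =====
-- step of A's second loop: state = (caps, newStr as list of chars)
def alphabetSoupStepA (s : List Char × List Char) (letter : Char) : List Char × List Char :=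
  if PySem.List.count s.1 (PySem.Chars.upperChar letter) ≠ 0 then
    match PySem.List.index? s.1 (PySem.Chars.upperChar letter) with
    | some i =>
      match PySem.List.pop? s.1 (i : Int) with
      | some (_, rest) => (rest, s.2 ++ [PySem.Chars.upperChar letter])
      | none => (s.1, s.2 ++ [PySem.Chars.upperChar letter])  -- unreachable: i from index?
    | none => (s.1, s.2 ++ [PySem.Chars.upperChar letter])    -- unreachable: count ≠ 0
  else
    (s.1, s.2 ++ [letter])

def alphabetSoup (str : String) : String :=
  let li := PySem.List.sorted str.toList (fun c => c) false
  let liLower := PySem.List.sorted (PySem.Chars.lower str.toList) (fun c => c) false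
  let caps := li.foldl (fun acc c => if PySem.Chars.isupper c then acc ++ [c] else acc) []
  let res := liLower.foldl alphabetSoupStepA (caps, [])
  String.ofList res.2

-- ===== PORT B =====
-- Source B: return "".join(sorted(str, key=lambda c: (c.lower(), c.islower())))
def alphabetSoup_alt (str : String) : String :=
  String.ofList (PySem.List.sorted2 str.toList
    (fun c => PySem.Chars.lowerChar c) (fun c => PySem.Chars.islower c) false)

-- ===== PRECONDITION & SPEC =====
def Spec_alphabetSoup (str : String) (out : String) : Prop := out = alphabetSoup_alt str
instance (str : String) (out : String) : Decidable (Spec_alphabetSoup str out) := by unfold Spec_alphabetSoup; infer_instance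

-- ===== CLAIM (what is proved, stated in full; the proofs are below) =====
def Claim_equal_alphabetSoup : Prop := ∀ (str : String), Dom_alphabetSoup str → Spec_alphabetSoup str (alphabetSoup str)

-- ===== LEMMAS AND PROOFS =====

-- B's tuple sort key (lowerChar c, islower c), encoded as a single Nat, lexicographically
def pvKey (c : Char) : Nat :=
  2 * (PySem.Chars.lowerChar c).toNat + (if PySem.Chars.islower c then 1 else 0)

-- recursive model of A's second loop
def soup : List Char → List Char → List Char
  | [], _ => []
  | x :: t, caps =>
    if List.count (PySem.Chars.upperChar x) caps ≠ 0 then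
      PySem.Chars.upperChar x :: soup t (caps.erase (PySem.Chars.upperChar x))
    else
      x :: soup t caps

-- ---- character-level facts ----

lemma char_le_iff (a b : Char) : a ≤ b ↔ a.toNat ≤ b.toNat := Char.le_def

lemma char_lt_iff (a b : Char) : a < b ↔ a.toNat < b.toNat := Char.lt_def

lemma char_toNat_inj {a b : Char} (h : a.toNat = b.toNat) : a = b :=
  le_antisymm ((char_le_iff a b).mpr h.le) ((char_le_iff b a).mpr h.ge)

lemma isupper_iff (c : Char) : PySem.Chars.isupper c = true ↔ (65 ≤ c.toNat ∧ c.toNat ≤ 90) := by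
  have hA : ('A' : Char).toNat = 65 := rfl
  have hZ : ('Z' : Char).toNat = 90 := rfl
  simp only [PySem.Chars.isupper, Bool.and_eq_true, decide_eq_true_iff, char_le_iff, hA, hZ]

lemma islower_iff (c : Char) : PySem.Chars.islower c = true ↔ (97 ≤ c.toNat ∧ c.toNat ≤ 122) := by
  have ha : ('a' : Char).toNat = 97 := rfl
  have hz : ('z' : Char).toNat = 122 := rfl
  simp only [PySem.Chars.islower, Bool.and_eq_true, decide_eq_true_iff, char_le_iff, ha, hz]

lemma islower_isupper_false {c : Char} (h : PySem.Chars.islower c = true) :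
    PySem.Chars.isupper c = false := by
  rw [islower_iff] at h
  rw [Bool.eq_false_iff, Ne, isupper_iff]
  omega

lemma isupper_islower_false {c : Char} (h : PySem.Chars.isupper c = true) :
    PySem.Chars.islower c = false := by
  rw [isupper_iff] at h
  rw [Bool.eq_false_iff, Ne, islower_iff]
  omega

lemma lowerChar_toNat_of_upper {c : Char} (h : PySem.Chars.isupper c = true) :
    (PySem.Chars.lowerChar c).toNat = c.toNat + 32 := by
  have hb := (isupper_iff c).mp h
  simp only [PySem.Chars.lowerChar, h, if_true]
  rw [Char.toNat_ofNat, if_pos]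
  exact Or.inl (by omega)

lemma lowerChar_eq_self {c : Char} (h : PySem.Chars.isupper c = false) :
    PySem.Chars.lowerChar c = c := by
  simp [PySem.Chars.lowerChar, h]

lemma upperChar_toNat_of_lower {c : Char} (h : PySem.Chars.islower c = true) :
    (PySem.Chars.upperChar c).toNat = c.toNat - 32 := by
  have hb := (islower_iff c).mp h
  simp only [PySem.Chars.upperChar, h, if_true]
  rw [Char.toNat_ofNat, if_pos]
  exact Or.inl (by omega)

lemma upperChar_eq_self {c : Char} (h : PySem.Chars.islower c = false) :
    PySem.Chars.upperChar c = c := by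
  simp [PySem.Chars.upperChar, h]

lemma islower_lowerChar_of_upper {c : Char} (h : PySem.Chars.isupper c = true) :
    PySem.Chars.islower (PySem.Chars.lowerChar c) = true := by
  have hb := (isupper_iff c).mp h
  rw [islower_iff, lowerChar_toNat_of_upper h]
  omega

lemma isupper_upperChar_of_lower {c : Char} (h : PySem.Chars.islower c = true) :
    PySem.Chars.isupper (PySem.Chars.upperChar c) = true := by
  have hb := (islower_iff c).mp h
  rw [isupper_iff, upperChar_toNat_of_lower h]
  omega

lemma isupper_lowerChar_false (c : Char) :
    PySem.Chars.isupper (PySem.Chars.lowerChar c) = false := by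
  cases hu : PySem.Chars.isupper c with
  | false => rw [lowerChar_eq_self hu]; exact hu
  | true =>
    have hb := (isupper_iff c).mp hu
    rw [Bool.eq_false_iff, Ne, isupper_iff, lowerChar_toNat_of_upper hu]
    omega

lemma lowerChar_upperChar {c : Char} (h : PySem.Chars.islower c = true) :
    PySem.Chars.lowerChar (PySem.Chars.upperChar c) = c := by
  have hb := (islower_iff c).mp h
  apply char_toNat_inj
  rw [lowerChar_toNat_of_upper (isupper_upperChar_of_lower h), upperChar_toNat_of_lower h]
  omega

lemma upperChar_lowerChar {c : Char} (h : PySem.Chars.isupper c = true) :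
    PySem.Chars.upperChar (PySem.Chars.lowerChar c) = c := by
  have hb := (isupper_iff c).mp h
  apply char_toNat_inj
  rw [upperChar_toNat_of_lower (islower_lowerChar_of_upper h), lowerChar_toNat_of_upper h]
  omega

lemma islower_of_upperChar_upper {c : Char} (h1 : PySem.Chars.isupper c = false)
    (h2 : PySem.Chars.isupper (PySem.Chars.upperChar c) = true) :
    PySem.Chars.islower c = true := by
  cases hl : PySem.Chars.islower c with
  | true => rfl
  | false =>
    rw [upperChar_eq_self hl, h1] at h2
    exact absurd h2 (by simp)

lemma lowerChar_eq_iff_of_lower {X : Char} (h : PySem.Chars.islower X = true) (c : Char) :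
    PySem.Chars.lowerChar c = X ↔ (c = X ∨ c = PySem.Chars.upperChar X) := by
  constructor
  · intro hc
    cases hu : PySem.Chars.isupper c with
    | false => exact Or.inl (by rw [← hc, lowerChar_eq_self hu])
    | true => exact Or.inr (by rw [← hc, upperChar_lowerChar hu])
  · rintro (rfl | rfl)
    · exact lowerChar_eq_self (islower_isupper_false h)
    · exact lowerChar_upperChar h

lemma lowerChar_eq_iff_of_other {X : Char} (h1 : PySem.Chars.isupper X = false)
    (h2 : PySem.Chars.islower X = false) (c : Char) :
    PySem.Chars.lowerChar c = X ↔ c = X := by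
  constructor
  · intro hc
    cases hu : PySem.Chars.isupper c with
    | false => rw [← hc, lowerChar_eq_self hu]
    | true =>
      exfalso
      have := islower_lowerChar_of_upper hu
      rw [hc, h2] at this
      exact absurd this (by simp)
  · rintro rfl; exact lowerChar_eq_self h1

lemma pvKey_of_not_upper {c : Char} (h : PySem.Chars.isupper c = false) :
    pvKey c = 2 * c.toNat + (if PySem.Chars.islower c then 1 else 0) := by
  rw [pvKey, lowerChar_eq_self h]

lemma pvKey_upperChar {c : Char} (h : PySem.Chars.islower c = true) :
    pvKey (PySem.Chars.upperChar c) = 2 * c.toNat := by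
  rw [pvKey, lowerChar_upperChar h,
    isupper_islower_false (isupper_upperChar_of_lower h)]
  simp

lemma pvKey_eq_lower {c : Char} (h : PySem.Chars.islower c = true) :
    pvKey c = 2 * c.toNat + 1 := by
  rw [pvKey, lowerChar_eq_self (islower_isupper_false h), h]
  simp

lemma pvKey_eq_upper {c : Char} (h : PySem.Chars.isupper c = true) :
    pvKey c = 2 * (c.toNat + 32) := by
  rw [pvKey, isupper_islower_false h, lowerChar_toNat_of_upper h]
  simp

lemma pvKey_eq_other {c : Char} (h1 : PySem.Chars.isupper c = false)
    (h2 : PySem.Chars.islower c = false) : pvKey c = 2 * c.toNat := by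
  rw [pvKey, lowerChar_eq_self h1, h2]
  simp

lemma not_lower_bounds {c : Char} (h : PySem.Chars.islower c = false) :
    ¬ (97 ≤ c.toNat ∧ c.toNat ≤ 122) := fun hh => by
  rw [(islower_iff c).mpr hh] at h
  exact absurd h (by simp)

lemma pvKey_inj : Function.Injective pvKey := by
  intro a b h
  cases hla : PySem.Chars.islower a with
  | true =>
    rw [pvKey_eq_lower hla] at h
    cases hlb : PySem.Chars.islower b with
    | true =>
      rw [pvKey_eq_lower hlb] at h
      exact char_toNat_inj (by omega)
    | false =>
      cases hub : PySem.Chars.isupper b with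
      | true => rw [pvKey_eq_upper hub] at h; exact absurd h (by omega)
      | false => rw [pvKey_eq_other hub hlb] at h; exact absurd h (by omega)
  | false =>
    cases hua : PySem.Chars.isupper a with
    | true =>
      rw [pvKey_eq_upper hua] at h
      have hba := (isupper_iff a).mp hua
      cases hlb : PySem.Chars.islower b with
      | true => rw [pvKey_eq_lower hlb] at h; exact absurd h (by omega)
      | false =>
        cases hub : PySem.Chars.isupper b with
        | true =>
          rw [pvKey_eq_upper hub] at h
          exact char_toNat_inj (by omega)
        | false =>
          rw [pvKey_eq_other hub hlb] at h
          exact absurd (show 97 ≤ b.toNat ∧ b.toNat ≤ 122 by omega) (not_lower_bounds hlb)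
    | false =>
      rw [pvKey_eq_other hua hla] at h
      cases hlb : PySem.Chars.islower b with
      | true => rw [pvKey_eq_lower hlb] at h; exact absurd h (by omega)
      | false =>
        cases hub : PySem.Chars.isupper b with
        | true =>
          rw [pvKey_eq_upper hub] at h
          have hbb := (isupper_iff b).mp hub
          exact absurd (show 97 ≤ a.toNat ∧ a.toNat ≤ 122 by omega) (not_lower_bounds hla)
        | false =>
          rw [pvKey_eq_other hub hlb] at h
          exact char_toNat_inj (by omega)

-- ---- A-side: the fold is the recursive model `soup` ----

lemma pop_erase (caps : List Char) (u : Char) (h : List.count u caps ≠ 0) :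
    ∃ i, PySem.List.index? caps u = some i ∧
      PySem.List.pop? caps (i : Int) = some (u, caps.erase u) := by
  have hmem : u ∈ caps := List.count_pos_iff.mp (Nat.pos_of_ne_zero h)
  obtain ⟨i, hi⟩ := Option.isSome_iff_exists.mp ((PySem.List.index?_isSome_iff caps u).mpr hmem)
  obtain ⟨pre, suf, hsplit, hlen, hnpre⟩ := (PySem.List.index?_eq_some_iff caps u i).mp hi
  refine ⟨i, hi, ?_⟩
  have hlt : i < caps.length := by
    subst hsplit; subst hlen
    simp only [List.length_append, List.length_cons]; omega
  rw [PySem.List.pop?_natCast caps i hlt]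
  subst hsplit
  congr 1
  refine Prod.ext ?_ ?_
  · simp [← hlen]
  · subst hlen
    simp only
    rw [List.erase_append_right _ hnpre, List.erase_cons_head]
    simp [List.eraseIdx_append_of_length_le (le_refl pre.length)]

lemma foldA (l : List Char) : ∀ (caps acc : List Char),
    (l.foldl alphabetSoupStepA (caps, acc)).2 = acc ++ soup l caps := by
  induction l with
  | nil => intro caps acc; simp [soup]
  | cons x t ih =>
    intro caps acc
    simp only [List.foldl_cons]
    by_cases hc : List.count (PySem.Chars.upperChar x) caps = 0
    · have hcc : ¬ (PySem.List.count caps (PySem.Chars.upperChar x) ≠ 0) := by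
        simp [PySem.List.count_eq, hc]
      have hA : alphabetSoupStepA (caps, acc) x = (caps, acc ++ [x]) := by
        simp only [alphabetSoupStepA]
        rw [if_neg hcc]
      rw [hA, soup, if_neg (by simpa using hc), ih]
      simp
    · have hcc : PySem.List.count caps (PySem.Chars.upperChar x) ≠ 0 := by
        simp [PySem.List.count_eq, hc]
      obtain ⟨i, hidx, hpop⟩ := pop_erase caps (PySem.Chars.upperChar x) hc
      have hA : alphabetSoupStepA (caps, acc) x
          = (caps.erase (PySem.Chars.upperChar x), acc ++ [PySem.Chars.upperChar x]) := by
        simp only [alphabetSoupStepA]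
        rw [if_pos hcc, hidx]
        show (match PySem.List.pop? caps (i : Int) with
              | some (_, rest) => (rest, acc ++ [PySem.Chars.upperChar x])
              | none => (caps, acc ++ [PySem.Chars.upperChar x]))
            = (caps.erase (PySem.Chars.upperChar x), acc ++ [PySem.Chars.upperChar x])
        rw [hpop]
      rw [hA, soup, if_pos hc, ih]
      simp

-- ---- counting: the multiset of A's output ----

lemma countP_or_eq {α : Type} [DecidableEq α] (X Y : α) (hXY : X ≠ Y) (l : List α) :
    List.countP (fun c => c == X || c == Y) l = List.count X l + List.count Y l := by
  induction l with
  | nil => simp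
  | cons a t ih =>
    simp only [List.countP_cons, List.count_cons, ih, beq_iff_eq]
    by_cases hx : a = X <;> by_cases hy : a = Y
    · exact absurd (hx.symm.trans hy) hXY
    · simp [hx, hy, hXY, Ne.symm hXY]
      try omega
    · simp [hx, hy, hXY, Ne.symm hXY]
      try omega
    · simp [hx, hy]

lemma soup_count : ∀ (l caps : List Char),
    (∀ u ∈ caps, PySem.Chars.isupper u = true) →
    (∀ x ∈ l, PySem.Chars.isupper x = false) →
    (∀ u ∈ caps, List.count u caps ≤ List.count (PySem.Chars.lowerChar u) l) →
    ∀ X, List.count X (soup l caps) =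
      if PySem.Chars.isupper X = true then List.count X caps
      else List.count X l - List.count (PySem.Chars.upperChar X) caps := by
  intro l
  induction l with
  | nil =>
    intro caps hcap _ hsub X
    cases caps with
    | nil => simp [soup]
    | cons u cs =>
      exfalso
      have h1 := hsub u (by simp)
      rw [List.count_nil] at h1
      have h2 : List.count u (u :: cs) ≠ 0 := by simp [List.count_cons]
      omega
  | cons x t ih =>
    intro caps hcap hlow hsub X
    have hxf : PySem.Chars.isupper x = false := hlow x (by simp)
    by_cases hc : List.count (PySem.Chars.upperChar x) caps = 0
    · -- lowercase branch
      rw [soup, if_neg (by simpa using hc)]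
      have hsub' : ∀ u ∈ caps, List.count u caps ≤ List.count (PySem.Chars.lowerChar u) t := by
        intro u hu
        have h1 := hsub u hu
        rw [List.count_cons] at h1
        by_cases hlx : x = PySem.Chars.lowerChar u
        · have hux : u = PySem.Chars.upperChar x := by
            rw [hlx, upperChar_lowerChar (hcap u hu)]
          rw [hux, hc]
          exact Nat.zero_le _
        · simp only [beq_iff_eq, if_neg hlx, Nat.add_zero] at h1
          exact h1
      have hrec := ih caps hcap (fun y hy => hlow y (by simp [hy])) hsub' X
      by_cases hxX : X = x
      · rw [hxX] at hrec ⊢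
        rw [List.count_cons_self, hrec, if_neg (by simp [hxf]), if_neg (by simp [hxf]),
          List.count_cons_self]
        omega
      · rw [List.count_cons_of_ne (Ne.symm hxX), hrec]
        cases hXU : PySem.Chars.isupper X with
        | true => rfl
        | false =>
          rw [if_neg (by simp [hXU]), if_neg (by simp [hXU]),
            List.count_cons_of_ne (Ne.symm hxX)]
    · -- uppercase branch
      have hmem : PySem.Chars.upperChar x ∈ caps := List.count_pos_iff.mp (Nat.pos_of_ne_zero hc)
      have hux : PySem.Chars.isupper (PySem.Chars.upperChar x) = true := hcap _ hmem
      have hlx : PySem.Chars.islower x = true := islower_of_upperChar_upper hxf hux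
      have hlow_u : PySem.Chars.lowerChar (PySem.Chars.upperChar x) = x := lowerChar_upperChar hlx
      have hcnt_x : List.count (PySem.Chars.upperChar x) caps ≤ List.count x t + 1 := by
        have h1 := hsub _ hmem
        rw [hlow_u, List.count_cons] at h1
        simpa using h1
      rw [soup, if_pos (by simpa using hc)]
      have hcap' : ∀ u ∈ caps.erase (PySem.Chars.upperChar x), PySem.Chars.isupper u = true :=
        fun u hu => hcap u (List.mem_of_mem_erase hu)
      have hsub' : ∀ u ∈ caps.erase (PySem.Chars.upperChar x),
          List.count u (caps.erase (PySem.Chars.upperChar x))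
            ≤ List.count (PySem.Chars.lowerChar u) t := by
        intro u hu
        have humem := List.mem_of_mem_erase hu
        have h1 := hsub u humem
        rw [List.count_cons] at h1
        simp only [List.count_erase, beq_iff_eq]
        by_cases hequ : u = PySem.Chars.upperChar x
        · subst hequ
          rw [hlow_u] at h1 ⊢
          simp only [beq_iff_eq, if_pos rfl] at h1 ⊢
          omega
        · rw [if_neg (fun hh => hequ hh.symm)]
          by_cases hlxu : x = PySem.Chars.lowerChar u
          · exact absurd (by rw [hlxu, upperChar_lowerChar (hcap u humem)]) hequ
          · simp only [beq_iff_eq, if_neg hlxu, Nat.add_zero] at h1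
            exact h1
      have hrec := ih (caps.erase (PySem.Chars.upperChar x)) hcap'
        (fun y hy => hlow y (by simp [hy])) hsub' X
      by_cases hXu : X = PySem.Chars.upperChar x
      · rw [hXu] at hrec ⊢
        rw [List.count_cons_self, hrec, if_pos hux, if_pos hux, List.count_erase_self]
        omega
      · rw [List.count_cons_of_ne (Ne.symm hXu), hrec]
        cases hXU : PySem.Chars.isupper X with
        | true =>
          simp only [if_pos rfl]
          exact List.count_erase_of_ne hXu
        | false =>
          rw [if_neg (by simp [hXU]), if_neg (by simp [hXU])]
          by_cases hxX : X = x
          · rw [hxX]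
            rw [List.count_erase_self, List.count_cons_self]
            omega
          · have hXup : PySem.Chars.upperChar X ≠ PySem.Chars.upperChar x := by
              intro hh
              cases hlX : PySem.Chars.islower X with
              | true => exact hxX (by rw [← lowerChar_upperChar hlX, hh, hlow_u])
              | false => exact hXu (by rw [← upperChar_eq_self hlX, hh])
            rw [List.count_erase_of_ne hXup, List.count_cons_of_ne (Ne.symm hxX)]

-- ---- membership shape of A's output ----

lemma soup_mem : ∀ (l caps : List Char) (z : Char), z ∈ soup l caps →
    z ∈ l ∨ ∃ m ∈ l, z = PySem.Chars.upperChar m ∧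
      List.count (PySem.Chars.upperChar m) caps ≠ 0 := by
  intro l
  induction l with
  | nil => intro caps z hz; simp [soup] at hz
  | cons x t ih =>
    intro caps z hz
    by_cases hc : List.count (PySem.Chars.upperChar x) caps = 0
    · rw [soup, if_neg (by simpa using hc)] at hz
      rcases List.mem_cons.mp hz with h | h
      · exact Or.inl (by simp [h])
      · rcases ih caps z h with h2 | ⟨m, hm, hzm, hcm⟩
        · exact Or.inl (by simp [h2])
        · exact Or.inr ⟨m, by simp [hm], hzm, hcm⟩
    · rw [soup, if_pos (by simpa using hc)] at hz
      rcases List.mem_cons.mp hz with h | h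
      · exact Or.inr ⟨x, by simp, h, hc⟩
      · rcases ih _ z h with h2 | ⟨m, hm, hzm, hcm⟩
        · exact Or.inl (by simp [h2])
        · refine Or.inr ⟨m, by simp [hm], hzm, fun hz0 => hcm ?_⟩
          rw [List.count_erase, hz0]
          simp

-- ---- sortedness of A's output under pvKey ----

lemma soup_pairwise : ∀ (l caps : List Char),
    List.Pairwise (· ≤ ·) l →
    (∀ x ∈ l, PySem.Chars.isupper x = false) →
    (∀ u ∈ caps, PySem.Chars.isupper u = true) →
    List.Pairwise (fun a b => pvKey a ≤ pvKey b) (soup l caps) := by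
  intro l
  induction l with
  | nil => intro caps _ _ _; simp [soup]
  | cons x t ih =>
    intro caps hl hlow hcap
    obtain ⟨hrel, hl'⟩ := List.pairwise_cons.mp hl
    have hxf : PySem.Chars.isupper x = false := hlow x (by simp)
    by_cases hc : List.count (PySem.Chars.upperChar x) caps = 0
    · -- lowercase branch: head is x
      rw [soup, if_neg (by simpa using hc)]
      refine List.Pairwise.cons ?_ (ih caps hl' (fun y hy => hlow y (by simp [hy])) hcap)
      intro z hz
      rcases soup_mem t caps z hz with hzt | ⟨m, hm, rfl, hcm⟩
      · have hzf := hlow z (by simp [hzt])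
        have hxz : x.toNat ≤ z.toNat := (char_le_iff x z).mp (hrel z hzt)
        rw [pvKey_of_not_upper hxf, pvKey_of_not_upper hzf]
        by_cases he : x.toNat = z.toNat
        · rw [char_toNat_inj he]
        · split_ifs <;> omega
      · have hmm : PySem.Chars.upperChar m ∈ caps := List.count_pos_iff.mp (Nat.pos_of_ne_zero hcm)
        have hmu : PySem.Chars.isupper (PySem.Chars.upperChar m) = true := hcap _ hmm
        have hml : PySem.Chars.islower m = true :=
          islower_of_upperChar_upper (hlow m (by simp [hm])) hmu
        have hxm : x.toNat ≤ m.toNat := (char_le_iff x m).mp (hrel m hm)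
        have hne : x.toNat ≠ m.toNat := by
          intro he
          rw [char_toNat_inj he] at hc
          exact hcm hc
        rw [pvKey_of_not_upper hxf, pvKey_upperChar hml]
        split_ifs <;> omega
    · -- uppercase branch: head is upperChar x
      have hmem : PySem.Chars.upperChar x ∈ caps := List.count_pos_iff.mp (Nat.pos_of_ne_zero hc)
      have hux : PySem.Chars.isupper (PySem.Chars.upperChar x) = true := hcap _ hmem
      have hlx : PySem.Chars.islower x = true := islower_of_upperChar_upper hxf hux
      rw [soup, if_pos (by simpa using hc)]
      refine List.Pairwise.cons ?_
        (ih _ hl' (fun y hy => hlow y (by simp [hy]))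
          (fun u hu => hcap u (List.mem_of_mem_erase hu)))
      intro z hz
      rcases soup_mem t _ z hz with hzt | ⟨m, hm, rfl, hcm⟩
      · have hzf := hlow z (by simp [hzt])
        have hxz : x.toNat ≤ z.toNat := (char_le_iff x z).mp (hrel z hzt)
        rw [pvKey_upperChar hlx, pvKey_of_not_upper hzf]
        split_ifs <;> omega
      · have hmm : PySem.Chars.upperChar m ∈ caps :=
          List.mem_of_mem_erase (List.count_pos_iff.mp (Nat.pos_of_ne_zero hcm))
        have hml : PySem.Chars.islower m = true :=
          islower_of_upperChar_upper (hlow m (by simp [hm])) (hcap _ hmm)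
        have hxm : x.toNat ≤ m.toNat := (char_le_iff x m).mp (hrel m hm)
        rw [pvKey_upperChar hlx, pvKey_upperChar hml]
        omega

-- ---- B-side: the tuple-key sort is the pvKey sort ----

lemma cmp_eq : (fun a b : Char =>
      decide (PySem.Chars.lowerChar a < PySem.Chars.lowerChar b) ||
        (!decide (PySem.Chars.lowerChar b < PySem.Chars.lowerChar a) &&
          decide (PySem.Chars.islower a < PySem.Chars.islower b)))
    = fun a b : Char => decide (pvKey a < pvKey b) := by
  funext a b
  rw [Bool.eq_iff_iff]
  simp only [Bool.or_eq_true, Bool.and_eq_true, Bool.not_eq_true', decide_eq_true_iff,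
    decide_eq_false_iff_not, pvKey, char_lt_iff]
  cases hla : PySem.Chars.islower a <;> cases hlb : PySem.Chars.islower b <;>
    simp [Bool.lt_iff] <;> omega

lemma sorted2_eq_sorted_key (xs : List Char) :
    PySem.List.sorted2 xs (fun c => PySem.Chars.lowerChar c)
      (fun c => PySem.Chars.islower c) false
      = PySem.List.sorted xs pvKey false := by
  simp only [PySem.List.sorted2, PySem.List.sorted, Bool.false_eq_true, if_false, cmp_eq]

-- ---- top-level count bookkeeping ----

lemma count_map_lower (s : List Char) (X : Char) :
    List.count X (PySem.Chars.lower s) = List.countP (fun c => PySem.Chars.lowerChar c == X) s := by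
  show List.count X (s.map PySem.Chars.lowerChar) = _
  simp only [List.count, List.countP_map]
  rfl

lemma count_final (s : List Char) (X : Char) :
    (if PySem.Chars.isupper X = true
     then List.count X ((PySem.List.sorted s (fun c => c) false).filter PySem.Chars.isupper)
     else List.count X (PySem.List.sorted (PySem.Chars.lower s) (fun c => c) false)
          - List.count (PySem.Chars.upperChar X)
              ((PySem.List.sorted s (fun c => c) false).filter PySem.Chars.isupper))
    = List.count X s := by
  have hperm := PySem.List.sorted_perm s (fun c => c) false
  have hpermL := PySem.List.sorted_perm (PySem.Chars.lower s) (fun c => c) false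
  cases hXU : PySem.Chars.isupper X with
  | true =>
    rw [if_pos rfl, List.count_filter hXU, hperm.count_eq]
  | false =>
    rw [if_neg (by simp)]
    rw [hpermL.count_eq, count_map_lower]
    cases hXL : PySem.Chars.islower X with
    | true =>
      have hXuu : PySem.Chars.isupper (PySem.Chars.upperChar X) = true :=
        isupper_upperChar_of_lower hXL
      have hne : X ≠ PySem.Chars.upperChar X := by
        intro hh
        rw [← hh] at hXuu
        rw [hXuu] at hXU
        exact absurd hXU (by simp)
      rw [List.count_filter hXuu, hperm.count_eq]
      have hcongr : List.countP (fun c => PySem.Chars.lowerChar c == X) s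
          = List.countP (fun c => c == X || c == PySem.Chars.upperChar X) s := by
        apply List.countP_congr
        intro c _
        have hiff := lowerChar_eq_iff_of_lower hXL c
        rw [Bool.eq_iff_iff]
        simp only [beq_iff_eq, Bool.or_eq_true]
        tauto
      rw [hcongr, countP_or_eq X (PySem.Chars.upperChar X) hne]
      omega
    | false =>
      have hXe : PySem.Chars.upperChar X = X := upperChar_eq_self hXL
      rw [hXe]
      have hzero : List.count X ((PySem.List.sorted s (fun c => c) false).filter
          PySem.Chars.isupper) = 0 := by
        rw [List.count_eq_zero]
        intro hmem
        have := (List.mem_filter.mp hmem).2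
        rw [this] at hXU
        exact absurd hXU (by simp)
      rw [hzero]
      have hcongr : List.countP (fun c => PySem.Chars.lowerChar c == X) s
          = List.countP (fun c => c == X) s := by
        apply List.countP_congr
        intro c _
        have hiff := lowerChar_eq_iff_of_other hXU hXL c
        rw [Bool.eq_iff_iff]
        simp only [beq_iff_eq]
        tauto
      rw [hcongr]
      simp [List.count]

lemma caps_sub (s : List Char) :
    ∀ u ∈ (PySem.List.sorted s (fun c => c) false).filter PySem.Chars.isupper,
      List.count u ((PySem.List.sorted s (fun c => c) false).filter PySem.Chars.isupper)
        ≤ List.count (PySem.Chars.lowerChar u)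
            (PySem.List.sorted (PySem.Chars.lower s) (fun c => c) false) := by
  intro u hu
  have huu : PySem.Chars.isupper u = true := (List.mem_filter.mp hu).2
  have hperm := PySem.List.sorted_perm s (fun c => c) false
  have hpermL := PySem.List.sorted_perm (PySem.Chars.lower s) (fun c => c) false
  rw [List.count_filter huu, hperm.count_eq, hpermL.count_eq, count_map_lower]
  have h1 : List.count u s = List.countP (fun c => c == u) s := by simp [List.count]
  rw [h1]
  apply List.countP_mono_left
  intro c _ hcu
  rw [beq_iff_eq] at hcu
  subst hcu
  simp

-- ===== VERDICT (by name: the statement is the Claim_ definition above) =====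
theorem alphabetSoup_spec : Claim_equal_alphabetSoup := by
  intro str _
  unfold Spec_alphabetSoup alphabetSoup alphabetSoup_alt
  simp only [PySem.List.foldl_append_if_eq_filter, List.nil_append, foldA, sorted2_eq_sorted_key]
  refine congrArg String.ofList ?_
  apply PySem.List.eq_of_perm_of_pairwise_le_of_injective pvKey pvKey_inj
  · refine (List.perm_iff_count.mpr ?_).trans (PySem.List.sorted_perm str.toList pvKey false).symm
    intro X
    rw [soup_count _ _ (fun u hu => (List.mem_filter.mp hu).2)
      (fun x hx => by
        have hx' := (PySem.List.mem_sorted _ _ _ _).mp hx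
        obtain ⟨c, _, rfl⟩ := List.mem_map.mp hx'
        exact isupper_lowerChar_false c)
      (caps_sub str.toList) X]
    exact count_final str.toList X
  · apply soup_pairwise
    · have := PySem.List.sorted_pairwise (PySem.Chars.lower str.toList) (fun c => c)
      simpa using this
    · intro x hx
      have hx' := (PySem.List.mem_sorted _ _ _ _).mp hx
      obtain ⟨c, _, rfl⟩ := List.mem_map.mp hx'
      exact isupper_lowerChar_false c
    · exact fun u hu => (List.mem_filter.mp hu).2
  · have := PySem.List.sorted_pairwise str.toList pvKey
    simpa using this
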